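-- pv_equiv track=rewrite | github.com/lighthousemacro/LHM | Scripts/publish_post.py | find_preceding_header
-- ===== SOURCE A (Python) =====
-- def find_preceding_header(md_text, img_path):
--     """Find the markdown heading that precedes this image reference."""
--     lines = md_text.split("\n")
--     last_header = None
--     for line in lines:
--         stripped = line.strip()
--         if stripped.startswith("## ") or stripped.startswith("### "):
--             last_header = stripped.lstrip("#").strip()
--         if img_path in line:
--             return last_header
--     return None
-- ===== SOURCE B (Python) =====
-- def find_preceding_header(md_text, img_path):
--     """Find the markdown heading that precedes this image reference."""
--     lines = md_text.split("\n")
--     idx = next((i for i, line in enumerate(lines) if img_path in line), None)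
--     if idx is None:
--         return None
--     for line in reversed(lines[:idx + 1]):
--         stripped = line.strip()
--         if stripped.startswith("## ") or stripped.startswith("### "):
--             return stripped.lstrip("#").strip()
--     return None
-- ===== Notes on version B (the rewrite author's own statement) =====
-- stated objective: alternative
-- what changed: B first locates the first line containing img_path, then scans backwards from that line for the nearest header, instead of A's forward pass that maintains a last-seen-header accumulator on every line.
import Mathlib
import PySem

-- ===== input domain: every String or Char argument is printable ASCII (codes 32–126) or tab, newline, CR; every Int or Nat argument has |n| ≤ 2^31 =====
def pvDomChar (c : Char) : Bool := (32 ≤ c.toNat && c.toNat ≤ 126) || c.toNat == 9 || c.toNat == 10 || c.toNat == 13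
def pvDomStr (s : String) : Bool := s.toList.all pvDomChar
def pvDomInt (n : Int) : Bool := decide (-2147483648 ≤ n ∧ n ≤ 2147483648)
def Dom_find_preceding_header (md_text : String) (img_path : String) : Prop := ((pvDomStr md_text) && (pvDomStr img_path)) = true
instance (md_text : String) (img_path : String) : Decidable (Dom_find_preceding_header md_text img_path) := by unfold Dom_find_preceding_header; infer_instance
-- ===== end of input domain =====

-- B replaces A's forward scan with a last-header accumulator by: find the first line containing
-- img_path, then scan backwards from it for the nearest header (alternative decomposition, same cost).

-- ===== PORT A =====
-- A's loop: for each line, update last_header if it is a header, return last_header when img_path is in the line.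
-- lstrip("#") is ported by hand as dropWhile (· == '#'): exact, Python's lstrip(chars) drops exactly the leading chars.
def pvGoA (img : List Char) : List (List Char) → Option (List Char) → Option (List Char)
  | [], _ => none
  | line :: rest, last =>
    let stripped := PySem.Chars.strip line
    let last' := if PySem.Chars.startswith stripped "## ".toList || PySem.Chars.startswith stripped "### ".toList
                 then some (PySem.Chars.strip (stripped.dropWhile (· == '#'))) else last
    if PySem.Chars.isIn img line then last' else pvGoA img rest last'

def find_preceding_header (md_text : String) (img_path : String) : Option String :=
  (pvGoA img_path.toList (PySem.Chars.splitOn md_text.toList "\n".toList) none).map String.ofList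

-- ===== PORT B =====
-- stripped header test + cleaning of one line; none if not a header (body of Source B's backward loop)
def pvHeaderOf (line : List Char) : Option (List Char) :=
  let stripped := PySem.Chars.strip line
  if PySem.Chars.startswith stripped "## ".toList || PySem.Chars.startswith stripped "### ".toList
  then some (PySem.Chars.strip (stripped.dropWhile (· == '#'))) else none

def find_preceding_header_alt (md_text : String) (img_path : String) : Option String :=
  let lines := PySem.Chars.splitOn md_text.toList "\n".toList
  match lines.findIdx? (fun line => PySem.Chars.isIn img_path.toList line) with
  | none => none
  | some i => ((lines.take (i + 1)).reverse.findSome? pvHeaderOf).map String.ofList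

-- ===== PRECONDITION & SPEC =====
def Spec_find_preceding_header (md_text : String) (img_path : String) (out : Option String) : Prop := out = find_preceding_header_alt md_text img_path
instance (md_text : String) (img_path : String) (out : Option String) : Decidable (Spec_find_preceding_header md_text img_path out) := by unfold Spec_find_preceding_header; infer_instance

-- ===== CLAIM (what is proved, stated in full; the proofs are below) =====
def Claim_equal_find_preceding_header : Prop := ∀ (md_text : String) (img_path : String), Dom_find_preceding_header md_text img_path → Spec_find_preceding_header md_text img_path (find_preceding_header md_text img_path)

-- ===== LEMMAS AND PROOFS =====

-- A's accumulator update is exactly (pvHeaderOf line).or last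
theorem pvGoA_cons (img line : List Char) (rest : List (List Char)) (last : Option (List Char)) :
    pvGoA img (line :: rest) last =
      if PySem.Chars.isIn img line then (pvHeaderOf line).or last
      else pvGoA img rest ((pvHeaderOf line).or last) := by
  simp only [pvGoA, pvHeaderOf]
  split_ifs <;> simp [Option.or]

-- characterisation of A's loop as B's find-then-backward-scan
theorem pvGoA_eq (img : List Char) (lines : List (List Char)) (last : Option (List Char)) :
    pvGoA img lines last =
      match lines.findIdx? (fun line => PySem.Chars.isIn img line) with
      | none => none
      | some i => ((lines.take (i + 1)).reverse.findSome? pvHeaderOf).or last := by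
  induction lines generalizing last with
  | nil => simp [pvGoA]
  | cons line rest ih =>
    rw [pvGoA_cons, List.findIdx?_cons]
    by_cases h : PySem.Chars.isIn img line
    · simp [h]
    · simp only [h, if_false, Bool.false_eq_true, ih]
      cases hf : rest.findIdx? (fun l => PySem.Chars.isIn img l) with
      | none => simp
      | some i =>
        simp only [Option.map_some, List.take_succ_cons, List.reverse_cons,
          List.findSome?_append, Option.or_assoc, List.findSome?]
        cases pvHeaderOf line <;> simp

-- ===== VERDICT (by name: the statement is the Claim_ definition above) =====
theorem find_preceding_header_spec : Claim_equal_find_preceding_header := by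
  intro md_text img_path _
  unfold Spec_find_preceding_header find_preceding_header find_preceding_header_alt
  rw [pvGoA_eq]
  cases hf : (PySem.Chars.splitOn md_text.toList "\n".toList).findIdx?
      (fun line => PySem.Chars.isIn img_path.toList line) with
  | none => simp only [hf, Option.map_none]
  | some i => simp only [hf, Option.or_none]
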